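-- pv_equiv track=rewrite | github.com/zcarc/problem-solving | 이코테/이론 및 실전문제/그리디/1이 될 때 까지.py | solution
-- ===== SOURCE A (Python) =====
-- def solution(n, k):
--
--     answer = 0
--
--     while n != 1:
--         if n % k == 0:
--             n = n // k
--             answer += 1
--         else:
--             n -= 1
--             answer += 1
--
--     return answer
-- ===== SOURCE B (Python) =====
-- def solution(n, k):
--     digits = []
--     while n:
--         digits.append(n % k)
--         n //= k
--     return len(digits) + sum(digits) - 2
-- ===== Notes on version B (the rewrite author's own statement) =====
-- stated objective: faster
-- what changed: replaces A's one-step-at-a-time simulation by computing the base-k digit expansion of n once and reading the answer off as len(digits) + sum(digits) - 2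
-- outside the precondition, e.g. on solution(1, 0): A returns 0, B raises ZeroDivisionError; on solution(1, 1): A returns 0, B does not finish within the time limit; on solution(2, -2): A returns 3, B returns -1
import Mathlib
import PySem

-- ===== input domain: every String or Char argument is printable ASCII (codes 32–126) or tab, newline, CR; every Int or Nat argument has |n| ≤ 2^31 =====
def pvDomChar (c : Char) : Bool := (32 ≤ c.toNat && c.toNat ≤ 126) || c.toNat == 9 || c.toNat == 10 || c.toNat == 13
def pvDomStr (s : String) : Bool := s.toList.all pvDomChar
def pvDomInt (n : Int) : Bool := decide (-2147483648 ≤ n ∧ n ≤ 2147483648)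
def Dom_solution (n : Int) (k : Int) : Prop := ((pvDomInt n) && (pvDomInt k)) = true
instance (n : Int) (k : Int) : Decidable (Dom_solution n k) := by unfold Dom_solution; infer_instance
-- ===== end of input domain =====

-- B computes the base-k digit expansion of n once and returns len+sum-2 instead of simulating A's step-by-step loop (O(log n) vs A's O(n)); return values proved equal on the natural domain n ≥ 1, k ≥ 2.


-- quotient bounds used for termination of both loops
theorem floordiv_shrink (n k : Int) (hn : 1 ≤ n) (hk : 2 ≤ k) :
    0 ≤ PySem.Int.floordiv n k ∧ PySem.Int.floordiv n k < n :=
  ⟨(PySem.Int.le_floordiv_iff_mul_le (by omega)).mpr (by nlinarith),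
   (PySem.Int.floordiv_lt_iff_lt_mul (by omega)).mpr (by nlinarith)⟩

-- ===== PORT A =====
-- A's while loop; the extra conjuncts 1 ≤ n ∧ 2 ≤ k in the guard only make the
-- recursion total (A diverges outside them), the computation is unchanged on Pre_.
def solutionLoop (n k answer : Int) : Int :=
  if h : n ≠ 1 ∧ 1 ≤ n ∧ 2 ≤ k then
    if PySem.Int.mod n k = 0 then
      solutionLoop (PySem.Int.floordiv n k) k (answer + 1)
    else
      solutionLoop (n - 1) k (answer + 1)
  else
    answer
termination_by n.toNat
decreasing_by
  · have := floordiv_shrink n k (by omega) (by omega); omega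
  · omega

def solution (n : Int) (k : Int) : Int := solutionLoop n k 0

-- ===== PORT B =====
-- B's `while n:` loop building the base-k digit list; the conjuncts 1 ≤ n ∧ 2 ≤ k
-- only make the recursion total (B raises or diverges outside them).
def solutionDigits (n k : Int) : List Int :=
  if h : 1 ≤ n ∧ 2 ≤ k then
    PySem.Int.mod n k :: solutionDigits (PySem.Int.floordiv n k) k
  else
    []
termination_by n.toNat
decreasing_by
  have := floordiv_shrink n k (by omega) (by omega); omega

def solution_alt (n : Int) (k : Int) : Int :=
  ((solutionDigits n k).length : Int) + (solutionDigits n k).sum - 2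

-- ===== PRECONDITION & SPEC =====
-- Pre_ restricts to the task's natural domain n ≥ 1, k ≥ 2. Outside it A diverges on
-- most inputs (n = 0, k = 1, …) and the values it returns on the sporadically
-- terminating ones (n = 1 with k < 2; some negative k) are accidents of its loop;
-- B raises, diverges or returns a different value there.
def Pre_solution (n : Int) (k : Int) : Prop := 1 ≤ n ∧ 2 ≤ k
instance (n : Int) (k : Int) : Decidable (Pre_solution n k) := by unfold Pre_solution; infer_instance
def pvWitness_solution : Int × Int := (10, 3)

def Spec_solution (n : Int) (k : Int) (out : Int) : Prop := out = solution_alt n k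
instance (n : Int) (k : Int) (out : Int) : Decidable (Spec_solution n k out) := by unfold Spec_solution; infer_instance

-- ===== CLAIM (what is proved, stated in full; the proofs are below) =====
def Claim_equal_solution : Prop := ∀ (n : Int) (k : Int), Dom_solution n k → Pre_solution n k → Spec_solution n k (solution n k)

-- ===== LEMMAS AND PROOFS =====

-- shifting n by 1 when n % k ≥ 1: quotient unchanged, remainder drops by 1
theorem emod_sub_one (n k : Int) (hk : 0 < k) (hr : 1 ≤ n % k) :
    (n - 1) / k = n / k ∧ (n - 1) % k = n % k - 1 := by
  have hlt : n % k < k := Int.emod_lt_of_pos n hk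
  have hid : k * (n / k) + n % k = n := Int.ediv_add_emod n k -- (deprecated name kept: states k*(n/k)+n%k = n)
  have h := Int.ediv_emod_unique (a := n - 1) (b := k) (r := n % k - 1) (q := n / k) hk
  exact ⟨(h.mpr ⟨by omega, by omega, by omega⟩).1, (h.mpr ⟨by omega, by omega, by omega⟩).2⟩

theorem loop_eq : ∀ (m : Nat) (n k a : Int), n.toNat ≤ m → 1 ≤ n → 2 ≤ k →
    solutionLoop n k a =
      a + (((solutionDigits n k).length : Int) + (solutionDigits n k).sum - 2) := by
  intro m
  induction m with
  | zero => intro n k a hm hn hk; omega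
  | succ m ih =>
    intro n k a hm hn hk
    have hk0 : (0 : Int) < k := by omega
    have hfd : PySem.Int.floordiv n k = n / k := PySem.Int.floordiv_eq_ediv_of_pos hk0
    have hmd : PySem.Int.mod n k = n % k := PySem.Int.mod_eq_emod_of_pos hk0
    by_cases h1 : n = 1
    · subst h1
      rw [solutionLoop, dif_neg (by omega)]
      rw [solutionDigits, dif_pos ⟨le_refl _, hk⟩, hfd, hmd,
          Int.emod_eq_of_lt (by omega) (by omega),
          Int.ediv_eq_zero_of_lt (by omega) (by omega),
          solutionDigits, dif_neg (by omega)]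
      simp
    · have hn2 : 2 ≤ n := by omega
      have hmod_nonneg : 0 ≤ n % k := Int.emod_nonneg n (by omega)
      have hmod_lt : n % k < k := Int.emod_lt_of_pos n hk0
      by_cases hr : n % k = 0
      · -- divisible round: A divides; B's digit list gains a 0 head
        have hnk : k ≤ n := by
          by_contra hnk
          have : n % k = n := Int.emod_eq_of_lt (by omega) (by omega)
          omega
        have hq1 : 1 ≤ n / k := by
          have := (PySem.Int.le_floordiv_iff_mul_le (a := n) (q := 1) hk0).mpr (by omega)
          rwa [hfd] at this
        have hqlt : n / k < n := by
          have := (floordiv_shrink n k (by omega) hk).2; rwa [hfd] at this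
        rw [solutionLoop, dif_pos ⟨h1, by omega, hk⟩, if_pos (by rw [hmd]; exact hr)]
        rw [ih (PySem.Int.floordiv n k) k (a + 1) (by rw [hfd]; omega)
              (by rw [hfd]; omega) hk]
        rw [show solutionDigits n k
              = PySem.Int.mod n k :: solutionDigits (PySem.Int.floordiv n k) k
            from by rw [solutionDigits, dif_pos ⟨by omega, hk⟩], hmd, hr]
        simp
        omega
      · -- nondivisible: A subtracts 1; digit lists of n and n-1 differ only in the head
        have hr1 : 1 ≤ n % k := by omega
        obtain ⟨hdiv, hmod⟩ := emod_sub_one n k hk0 hr1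
        rw [solutionLoop, dif_pos ⟨h1, by omega, hk⟩, if_neg (by rw [hmd]; exact hr)]
        rw [ih (n - 1) k (a + 1) (by omega) (by omega) hk]
        rw [solutionDigits, dif_pos (⟨by omega, hk⟩ : (1:Int) ≤ n - 1 ∧ 2 ≤ k)]
        rw [show solutionDigits n k = PySem.Int.mod n k :: solutionDigits (PySem.Int.floordiv n k) k
              from by rw [solutionDigits, dif_pos ⟨by omega, hk⟩]]
        have hfd' : PySem.Int.floordiv (n-1) k = (n-1) / k := PySem.Int.floordiv_eq_ediv_of_pos hk0
        have hmd' : PySem.Int.mod (n-1) k = (n-1) % k := PySem.Int.mod_eq_emod_of_pos hk0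
        rw [hfd, hfd', hmd, hmd', hdiv, hmod]
        simp
        ring

-- ===== VERDICT (by name: the statement is the Claim_ definition above) =====
theorem solution_spec : Claim_equal_solution := by
  intro n k _ hpre
  unfold Spec_solution solution solution_alt
  rw [loop_eq n.toNat n k 0 (le_refl _) hpre.1 hpre.2]; ring
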